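-- pv_equiv track=rewrite | github.com/Dimitrije-Jimmy/AdventOfCode2024 | day17/main7.3.py | backward_solve_from_end
-- ===== SOURCE A (Python) =====
-- def f(A):
--     B = (A % 8) ^ 2
--     C = A >> B
--     return (B ^ C ^ 3) % 8
--
-- def backward_solve_from_end(outputs):
--     reversed_outputs = outputs[::-1]
--
--     # Find all 10-bit numbers that produce the last output:
--     last_out = reversed_outputs[0]
--     current_set = [a for a in range(1024) if f(a) == last_out]
--
--     bit_length = 10
--
--     # Process each preceding output:
--     for i in range(1, len(reversed_outputs)):
--         next_out = reversed_outputs[i]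
--         new_set = []
--         bit_length += 3
--
--         # For each candidate c, prev_A = (c << 3) + x for x in [0..7]
--         # Keep those that produce next_out
--         for c in current_set:
--             base = c << 3
--             for x in range(8):
--                 candidate = base + x
--                 if f(candidate) == next_out:
--                     new_set.append(candidate)
--
--         current_set = new_set
--         if not current_set:
--             return []
--
--     return current_set
-- ===== SOURCE B (Python) =====
-- def f(A):
--     B = (A % 8) ^ 2
--     C = A >> B
--     return (B ^ C ^ 3) % 8
--
-- def rec(seq, c):
--     if not seq:
--         return [c]
--     return [r for x in range(8) if f((c << 3) + x) == seq[0]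
--               for r in rec(seq[1:], (c << 3) + x)]
--
-- def backward_solve_from_end(outputs):
--     rev = outputs[::-1]
--     return [r for a in range(1024) if f(a) == rev[0] for r in rec(rev[1:], a)]
-- ===== Notes on version B (the rewrite author's own statement) =====
-- stated objective: alternative
-- what changed: Replaced A's iterative level-by-level BFS that rebuilds the whole candidate list at each output (with an early empty-set return) by a recursive depth-first search expressed as nested list comprehensions over the reversed outputs, concatenating per-seed DFS results in seed order.
-- outside the precondition, e.g. on backward_solve_from_end([]): A raises IndexError, B raises IndexError
import Mathlib
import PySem

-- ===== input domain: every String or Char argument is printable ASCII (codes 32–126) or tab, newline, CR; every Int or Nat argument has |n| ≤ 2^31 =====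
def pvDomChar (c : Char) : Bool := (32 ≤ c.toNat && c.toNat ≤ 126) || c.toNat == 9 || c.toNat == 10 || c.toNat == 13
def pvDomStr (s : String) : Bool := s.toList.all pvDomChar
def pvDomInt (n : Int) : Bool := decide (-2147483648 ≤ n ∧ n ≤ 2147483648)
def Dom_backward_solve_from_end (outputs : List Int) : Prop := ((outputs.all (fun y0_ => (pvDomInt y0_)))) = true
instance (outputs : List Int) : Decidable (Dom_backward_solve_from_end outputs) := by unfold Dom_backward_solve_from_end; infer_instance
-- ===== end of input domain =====

-- B replaces A's level-by-level BFS over candidate sets by a recursive depth-first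
-- search written as nested comprehensions (objective: alternative decomposition, same cost).

-- ===== PORT A =====
-- shared same-module helper f (Python: B = (A % 8) ^ 2; C = A >> B; return (B ^ C ^ 3) % 8).
-- B is always ≥ 0 (mod of a positive divisor xor a nonneg literal), so `.toNat` on the
-- shift count is exact here.
def pvF (A : Int) : Int :=
  let B := PySem.Int.bxor (PySem.Int.mod A 8) 2
  let C := A >>> B.toNat
  PySem.Int.mod (PySem.Int.bxor (PySem.Int.bxor B C) 3) 8

-- the `for i in range(1, len(reversed_outputs))` loop, as recursion over the tail of
-- the reversed list (rev[i] for i = 1.. IS that tail), with A's early `return []`.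
def pvLoopA : List Int → List Int → List Int
  | [], cur => cur
  | next_out :: rest, cur =>
      let new_set := cur.foldl (fun (acc : List Int) (c : Int) =>
        let base := c <<< 3
        (PySem.List.pyRange 0 8 1).foldl (fun (acc2 : List Int) (x : Int) =>
          let candidate := base + x
          if pvF candidate == next_out then acc2 ++ [candidate] else acc2) acc) []
      if new_set = [] then [] else pvLoopA rest new_set

def backward_solve_from_end (outputs : List Int) : List Int :=
  -- outputs[::-1] is reverse
  match outputs.reverse with
  | [] => []   -- Python raises IndexError on reversed_outputs[0]; excluded by Pre_
  | last_out :: rest =>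
      let current_set := (PySem.List.pyRange 0 1024 1).filter (fun a => pvF a == last_out)
      pvLoopA rest current_set

-- ===== PORT B =====
-- rec(seq, c) of Source B: a comprehension is a flatMap of a guarded body (seq[1:] is the tail)
def pvRecB : List Int → Int → List Int
  | [], c => [c]
  | o :: rest, c =>
      (PySem.List.pyRange 0 8 1).flatMap (fun (x : Int) =>
        if pvF (c <<< 3 + x) == o then pvRecB rest (c <<< 3 + x) else [])

def backward_solve_from_end_alt (outputs : List Int) : List Int :=
  match outputs.reverse with
  | [] => []   -- Python raises IndexError on rev[0]; excluded by Pre_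
  | first :: rest =>
      (PySem.List.pyRange 0 1024 1).flatMap (fun (a : Int) =>
        if pvF a == first then pvRecB rest a else [])

-- ===== PRECONDITION & SPEC =====
-- Pre_ excludes only the empty list, where Python A raises IndexError on reversed_outputs[0].
def Pre_backward_solve_from_end (outputs : List Int) : Prop := outputs ≠ []
instance (outputs : List Int) : Decidable (Pre_backward_solve_from_end outputs) := by
  unfold Pre_backward_solve_from_end; infer_instance

def pvWitness_backward_solve_from_end : List Int := ([3])

def Spec_backward_solve_from_end (outputs : List Int) (out : List Int) : Prop := out = backward_solve_from_end_alt outputs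
instance (outputs : List Int) (out : List Int) : Decidable (Spec_backward_solve_from_end outputs out) := by unfold Spec_backward_solve_from_end; infer_instance

-- ===== CLAIM (what is proved, stated in full; the proofs are below) =====
def Claim_equal_backward_solve_from_end : Prop := ∀ (outputs : List Int), Dom_backward_solve_from_end outputs → Pre_backward_solve_from_end outputs → Spec_backward_solve_from_end outputs (backward_solve_from_end outputs)

-- ===== LEMMAS AND PROOFS =====

-- filter-then-flatMap as flatMap of a guarded body
theorem filter_flatMap_eq {b : Type} (l : List Int) (p : Int -> Bool) (h : Int -> List b) :
    (l.filter p).flatMap h = l.flatMap (fun (x : Int) => if p x then h x else []) := by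
  induction l with
  | nil => simp
  | cons x t ih =>
      by_cases hp : p x = true <;> simp [hp, ih]

-- one BFS level of A, as a flatMap of filtered children
theorem newset_eq_flatMap (o : Int) (cur : List Int) :
    cur.foldl (fun (acc : List Int) (c : Int) =>
        let base := c <<< 3
        (PySem.List.pyRange 0 8 1).foldl (fun (acc2 : List Int) (x : Int) =>
          let candidate := base + x
          if pvF candidate == o then acc2 ++ [candidate] else acc2) acc) []
      = cur.flatMap (fun (c : Int) =>
          ((PySem.List.pyRange 0 8 1).filter (fun (x : Int) => pvF (c <<< 3 + x) == o)).map
            (fun (x : Int) => c <<< 3 + x)) := by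
  have h1 : (fun (acc : List Int) (c : Int) =>
      let base := c <<< 3
      (PySem.List.pyRange 0 8 1).foldl (fun (acc2 : List Int) (x : Int) =>
        let candidate := base + x
        if pvF candidate == o then acc2 ++ [candidate] else acc2) acc)
      = (fun (acc : List Int) (c : Int) => acc ++
          ((PySem.List.pyRange 0 8 1).filter (fun (x : Int) => pvF (c <<< 3 + x) == o)).map
            (fun (x : Int) => c <<< 3 + x)) := by
    funext acc c
    exact PySem.List.foldl_append_if (fun (x : Int) => pvF (c <<< 3 + x) == o)
      (fun (x : Int) => c <<< 3 + x) _ _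
  rw [h1, PySem.List.foldl_append_eq_flatMap]; simp

-- main invariant: A's remaining BFS levels compute the concatenated DFS results
theorem loopA_eq_flatMap_recB (rest : List Int) :
    forall cur : List Int, pvLoopA rest cur = cur.flatMap (pvRecB rest) := by
  induction rest with
  | nil => intro cur; simp [pvLoopA, pvRecB]
  | cons o rest ih =>
      intro cur
      show (let new_set := cur.foldl (fun (acc : List Int) (c : Int) =>
          let base := c <<< 3
          (PySem.List.pyRange 0 8 1).foldl (fun (acc2 : List Int) (x : Int) =>
            let candidate := base + x
            if pvF candidate == o then acc2 ++ [candidate] else acc2) acc) [];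
        if new_set = [] then [] else pvLoopA rest new_set) = _
      simp only [newset_eq_flatMap]
      have hmain : (cur.flatMap (fun (c : Int) =>
          ((PySem.List.pyRange 0 8 1).filter (fun (x : Int) => pvF (c <<< 3 + x) == o)).map
            (fun (x : Int) => c <<< 3 + x))).flatMap (pvRecB rest)
          = cur.flatMap (pvRecB (o :: rest)) := by
        rw [List.flatMap_assoc]
        refine List.flatMap_congr ?_
        intro c _
        rw [List.flatMap_map, filter_flatMap_eq]
        rfl
      by_cases hz : cur.flatMap (fun (c : Int) =>
          ((PySem.List.pyRange 0 8 1).filter (fun (x : Int) => pvF (c <<< 3 + x) == o)).map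
            (fun (x : Int) => c <<< 3 + x)) = []
      · rw [if_pos hz, <- hmain, hz]
        simp
      · rw [if_neg hz, ih, hmain]

-- ===== VERDICT (by name: the statement is the Claim_ definition above) =====
theorem backward_solve_from_end_spec : Claim_equal_backward_solve_from_end := by
  intro outputs _ hpre
  show backward_solve_from_end outputs = backward_solve_from_end_alt outputs
  unfold backward_solve_from_end backward_solve_from_end_alt
  have hrev : outputs.reverse ≠ [] := by simpa using hpre
  match h : outputs.reverse with
  | [] => exact absurd h hrev
  | first :: rest =>
      dsimp only
      rw [loopA_eq_flatMap_recB, filter_flatMap_eq]
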